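-- pv_equiv track=rewrite | github.com/Networks-Learning/strategic-ttc | scripts/accuracy_analysis.py | majority_vote_correct
-- ===== SOURCE A (Python) =====
-- from collections import Counter
-- from typing import List, Optional, Tuple, Dict, Any, Callable
--
-- def majority_vote_correct(
--     preds: List[Optional[str]],
--     correct: List[bool],
-- ) -> Optional[bool]:
--     """
--     Given a list of predicted values (strings) and their correctness flags,
--     compute whether the *majority prediction* is correct.
--
--     Strategy:
--       - ignore None preds
--       - find most common pred (ties broken arbitrarily but deterministically)
--       - consider majority pred correct if any sample with that pred is correct.
--     """
--     valid = [(p, c) for p, c in zip(preds, correct) if p is not None]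
--     if not valid:
--         return None
--
--     values = [p for p, _ in valid]
--     counts = Counter(values)
--     majority_value, _ = counts.most_common(1)[0]
--
--     for p, c in valid:
--         if p == majority_value and c:
--             return True
--     return False
-- ===== SOURCE B (Python) =====
-- def majority_vote_correct(preds, correct):
--     # One pass: table maps pred -> [count, any_correct]; then argmax by count
--     # (max over insertion-ordered keys = most_common(1) tie-break).
--     table = {}
--     for p, c in zip(preds, correct):
--         if p is None:
--             continue
--         rec = table.get(p)
--         if rec is None:
--             table[p] = [1, bool(c)]
--         else:
--             rec[0] += 1
--             rec[1] = rec[1] or c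
--     if not table:
--         return None
--     majority = max(table, key=lambda k: table[k][0])
--     return table[majority][1]
-- ===== Notes on version B (the rewrite author's own statement) =====
-- stated objective: alternative
-- what changed: Replaces filter-list -> Counter -> most_common -> rescan with a single pass over zip(preds, correct) building one dict pred -> [count, any_correct], then an argmax over insertion-ordered keys; the separate correctness rescan disappears.
import Mathlib
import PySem

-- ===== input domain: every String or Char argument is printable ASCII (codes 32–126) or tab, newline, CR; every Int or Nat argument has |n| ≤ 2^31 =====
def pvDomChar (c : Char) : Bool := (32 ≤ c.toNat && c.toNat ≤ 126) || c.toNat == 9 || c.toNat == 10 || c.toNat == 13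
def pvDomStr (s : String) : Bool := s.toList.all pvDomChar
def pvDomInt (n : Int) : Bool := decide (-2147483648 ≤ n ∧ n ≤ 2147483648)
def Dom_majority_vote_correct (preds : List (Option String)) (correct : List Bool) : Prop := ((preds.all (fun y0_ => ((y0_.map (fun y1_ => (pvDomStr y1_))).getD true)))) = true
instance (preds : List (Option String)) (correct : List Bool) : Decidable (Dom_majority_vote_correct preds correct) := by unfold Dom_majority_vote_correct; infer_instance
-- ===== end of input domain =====

-- B builds one dict pred -> (count, any_correct) in a single pass and takes an argmax,
-- instead of A's filter -> Counter -> most_common -> rescan. Equivalence of RETURN values is proved.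

-- ===== PORT A =====
-- the 'for p, c in valid: if p == majority_value and c: return True / return False' loop
def mvcScan (maj : Option String) : List (Option String × Bool) → Bool
  | [] => false
  | pc :: t => if pc.1 == maj && pc.2 then true else mvcScan maj t

def majority_vote_correct (preds : List (Option String)) (correct : List Bool) : Option Bool :=
  let valid := (preds.zip correct).filter (fun pc => pc.1.isSome)
  if valid.isEmpty then none
  else
    let values := valid.map (fun pc => pc.1)
    let counts := PySem.Dict.counter values
    -- counts.most_common(1)[0]: first item with maximal count, in insertion order
    match PySem.List.max? counts.items (fun kv => kv.2) with
    | none => none   -- unreachable: valid is nonempty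
    | some kv => some (mvcScan kv.1 valid)

-- ===== PORT B =====
-- one loop step: skip None, else create/update the record (count, any_correct)
def mvcStep (d : PySem.Dict String (Int × Bool)) (pc : Option String × Bool) : PySem.Dict String (Int × Bool) :=
  match pc.1 with
  | none => d
  | some p =>
    match d.get? p with
    | some nf => d.insert p (nf.1 + 1, nf.2 || pc.2)
    | none => d.insert p (1, pc.2)

def majority_vote_correct_alt (preds : List (Option String)) (correct : List Bool) : Option Bool :=
  let table := (preds.zip correct).foldl mvcStep PySem.Dict.empty
  if table.size = 0 then none
  else
    match PySem.List.max? table.keys (fun k => (table.getD k ((0 : Int), false)).1) with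
    | none => none
    | some k => some ((table.getD k ((0 : Int), false)).2)

-- ===== PRECONDITION & SPEC =====
def Spec_majority_vote_correct (preds : List (Option String)) (correct : List Bool) (out : Option Bool) : Prop := out = majority_vote_correct_alt preds correct
instance (preds : List (Option String)) (correct : List Bool) (out : Option Bool) : Decidable (Spec_majority_vote_correct preds correct out) := by unfold Spec_majority_vote_correct; infer_instance

-- ===== CLAIM (what is proved, stated in full; the proofs are below) =====
def Claim_equal_majority_vote_correct : Prop := ∀ (preds : List (Option String)) (correct : List Bool), Dom_majority_vote_correct preds correct → Spec_majority_vote_correct preds correct (majority_vote_correct preds correct)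

-- ===== LEMMAS AND PROOFS =====

-- B's step, written as an unconditional insert of the updated record
theorem mvcStep_some (d : PySem.Dict String (Int × Bool)) (p : String) (c : Bool) :
    mvcStep d (some p, c)
      = d.insert p ((d.getD p ((0:Int), false)).1 + 1, (d.getD p ((0:Int), false)).2 || c) := by
  unfold mvcStep
  cases h : d.get? p with
  | none => simp [h, PySem.Dict.getD_of_get?_eq_none d _ h]
  | some nf => simp [h, PySem.Dict.getD_of_get?_eq_some d _ h]

-- every lookup in B's table: count of p among valid preds, OR of correctness flags at p
theorem mvcTable_getD (zs : List (Option String × Bool)) (d : PySem.Dict String (Int × Bool)) (p : String) :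
    (zs.foldl mvcStep d).getD p ((0:Int), false)
      = ((d.getD p ((0:Int), false)).1 + ((zs.filterMap (fun pc => pc.1)).count p : Int),
         (d.getD p ((0:Int), false)).2 || zs.any (fun pc => pc.1 == some p && pc.2)) := by
  induction zs generalizing d with
  | nil => simp
  | cons pc t ih =>
    obtain ⟨po, c⟩ := pc
    cases po with
    | none => simp [mvcStep, ih]
    | some q =>
      simp only [List.foldl_cons, mvcStep_some, ih, List.filterMap_cons,
        List.any_cons, List.count_cons]
      by_cases hpq : p = q
      · subst hpq
        simp [PySem.Dict.getD_insert_self, Bool.or_assoc]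
        omega
      · have : (some q == some p) = false := by
          simp [hpq]; exact fun h => hpq h.symm
        simp [PySem.Dict.getD_insert_of_ne d _ _ hpq, this, Ne.symm hpq]

-- the keys of B's table, in insertion order
theorem mvcTable_keys (zs : List (Option String × Bool)) (d : PySem.Dict String (Int × Bool)) :
    (zs.foldl mvcStep d).keys = PySem.Set.update d.keys (zs.filterMap (fun pc => pc.1)) := by
  induction zs generalizing d with
  | nil => rfl
  | cons pc t ih =>
    obtain ⟨po, c⟩ := pc
    cases po with
    | none => simpa [mvcStep] using ih d
    | some q =>
      have hstep : (mvcStep d (some q, c)).keys = PySem.Set.add d.keys q := by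
        rw [mvcStep_some]
        unfold PySem.Set.add
        by_cases h : d.contains q
        · rw [PySem.Dict.keys_insert_of_contains d _ h,
            if_pos (by simpa using (PySem.Dict.contains_iff_mem_keys d q).mp h)]
        · rw [PySem.Dict.keys_insert_of_not_contains d _ (by simpa using h),
            if_neg (by simpa using fun hm => h ((PySem.Dict.contains_iff_mem_keys d q).mpr hm))]
      calc (((some q, c) :: t).foldl mvcStep d).keys
          = PySem.Set.update (mvcStep d (some q, c)).keys (t.filterMap (fun pc => pc.1)) := ih _
        _ = PySem.Set.update d.keys (((some q, c) :: t).filterMap (fun pc => pc.1)) := by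
            rw [hstep]; rfl

-- the valid preds are the filterMapped strings, wrapped back in 'some'
theorem valid_map_fst (zs : List (Option String × Bool)) :
    ((zs.filter (fun pc => pc.1.isSome)).map (fun pc => pc.1))
      = (zs.filterMap (fun pc => pc.1)).map some := by
  induction zs with
  | nil => rfl
  | cons pc t ih =>
    obtain ⟨po, c⟩ := pc
    cases po <;> simp [ih]

-- building the set of 'some'-wrapped values is the map of the set of values
theorem set_update_map_some (l : List String) (s : PySem.Set String) :
    PySem.Set.update (s.map some) (l.map some) = (PySem.Set.update s l).map some := by
  induction l generalizing s with
  | nil => rfl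
  | cons x t ih =>
    show PySem.Set.update (PySem.Set.add (s.map some) (some x)) (t.map some)
          = (PySem.Set.update (PySem.Set.add s x) t).map some
    have : PySem.Set.add (s.map some) (some x) = (PySem.Set.add s x).map some := by
      unfold PySem.Set.add
      by_cases h : x ∈ s <;> simp [h]
    rw [this, ih]

theorem set_ofList_map_some (l : List String) :
    PySem.Set.ofList (l.map some) = (PySem.Set.ofList l).map some :=
  set_update_map_some l PySem.Set.empty

-- max? through a map
theorem max?_map {α β κ : Type} [LT κ] [DecidableLT κ] (f : α → β) (g : β → κ) (l : List α) :
    PySem.List.max? (l.map f) g = Option.map f (PySem.List.max? l (fun x => g (f x))) := by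
  unfold PySem.List.max?
  suffices h : ∀ (acc : Option α),
      (l.map f).foldl
        (fun acc x => match acc with
          | none => some x
          | some m => if g m < g x then some x else some m) (Option.map f acc)
        = Option.map f (l.foldl
            (fun acc x => match acc with
              | none => some x
              | some m => if g (f m) < g (f x) then some x else some m) acc) by
    simpa using h none
  intro acc
  induction l generalizing acc with
  | nil => rfl
  | cons x t ih =>
    cases acc with
    | none => simpa using ih (some x)
    | some m =>
      by_cases h : g (f m) < g (f x)
      · simpa [h] using ih (some x)
      · simpa [h] using ih (some m)

-- A's scan is an 'any'
theorem mvcScan_eq_any (maj : Option String) (l : List (Option String × Bool)) :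
    mvcScan maj l = l.any (fun pc => pc.1 == maj && pc.2) := by
  induction l with
  | nil => rfl
  | cons pc t ih =>
    simp only [mvcScan, List.any_cons, ← ih]
    by_cases h : (pc.1 == maj && pc.2) = true <;> simp [h]

-- the isSome filter is invisible to a 'matches some x' any
theorem any_filter_isSome (zs : List (Option String × Bool)) (x : String) :
    (zs.filter (fun pc => pc.1.isSome)).any (fun pc => pc.1 == some x && pc.2)
      = zs.any (fun pc => pc.1 == some x && pc.2) := by
  induction zs with
  | nil => rfl
  | cons pc t ih =>
    obtain ⟨po, c⟩ := pc
    cases po <;> simp [ih]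

-- ===== VERDICT (by name: the statement is the Claim_ definition above) =====
-- every record stored in B's finished table
theorem table_getD (zs : List (Option String × Bool)) (p : String) :
    (zs.foldl mvcStep PySem.Dict.empty).getD p ((0:Int), false)
      = (((zs.filterMap (fun pc => pc.1)).count p : Int),
         zs.any (fun pc => pc.1 == some p && pc.2)) := by
  rw [mvcTable_getD]; simp

theorem ofList_eq_nil (vs : List String) : PySem.Set.ofList vs = [] → vs = [] := by
  intro h
  cases vs with
  | nil => rfl
  | cons v t => exact absurd ((PySem.Set.mem_ofList _ _).mpr (List.mem_cons_self)) (by rw [h]; simp)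

-- ===== VERDICT (by name: the statement is the Claim_ definition above) =====
theorem majority_vote_correct_spec : Claim_equal_majority_vote_correct := by
  intro preds correct _
  unfold Spec_majority_vote_correct majority_vote_correct majority_vote_correct_alt
  simp only []
  set zs := preds.zip correct with hzs
  set vs := zs.filterMap (fun pc => pc.1) with hvs
  -- B's table size and key function
  have hkeys : (zs.foldl mvcStep PySem.Dict.empty).keys = PySem.Set.ofList vs := by
    rw [mvcTable_keys]; rfl
  have hsize : (zs.foldl mvcStep PySem.Dict.empty).size = (PySem.Set.ofList vs).length := by
    rw [← hkeys]; simp [PySem.Dict.size, PySem.Dict.keys]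
  have hbkey : (fun k => ((zs.foldl mvcStep PySem.Dict.empty).getD k ((0:Int), false)).1)
      = fun k => ((vs.count k : Int)) := by
    funext k; rw [table_getD]
  -- A's counter items and argmax
  have hitems : (PySem.Dict.counter ((zs.filter (fun pc => pc.1.isSome)).map (fun pc => pc.1))).items
      = (PySem.Set.ofList vs).map (fun x => (some x, (vs.count x : Int))) := by
    rw [valid_map_fst, PySem.Dict.items_counter, set_ofList_map_some, List.map_map]
    exact List.map_congr_left (fun x _ => by
      simp only [Function.comp]
      rw [List.count_map_of_injective vs some (fun a b h => Option.some.inj h) x])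
  have hamax : PySem.List.max?
        ((PySem.Dict.counter ((zs.filter (fun pc => pc.1.isSome)).map (fun pc => pc.1))).items)
        (fun kv => kv.2)
      = Option.map (fun x => (some x, (vs.count x : Int)))
          (PySem.List.max? (PySem.Set.ofList vs) (fun x => (vs.count x : Int))) := by
    rw [hitems, max?_map]
  cases hM : PySem.List.max? (PySem.Set.ofList vs) (fun x => (vs.count x : Int)) with
  | none =>
    have hnil : vs = [] := ofList_eq_nil vs ((PySem.List.max?_eq_none_iff _ _).mp hM)
    have hvalid : zs.filter (fun pc => pc.1.isSome) = [] := by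
      have := valid_map_fst zs
      rw [← hvs, hnil] at this
      simpa using this
    rw [hvalid]
    simp [hsize, hnil]
  | some x =>
    have hne : vs ≠ [] :=
      List.ne_nil_of_mem ((PySem.Set.mem_ofList _ _).mp (PySem.List.max?_mem hM))
    have hvalid : zs.filter (fun pc => pc.1.isSome) ≠ [] := by
      intro h
      have := valid_map_fst zs
      rw [← hvs, h] at this
      exact hne (by simpa using this.symm)
    have hsz : (zs.foldl mvcStep PySem.Dict.empty).size ≠ 0 := by
      rw [hsize]
      intro h
      exact hne (ofList_eq_nil vs (List.eq_nil_of_length_eq_zero h))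
    rw [if_neg (by simpa [List.isEmpty_iff] using hvalid), if_neg hsz, hamax, hkeys, hbkey, hM]
    simp only [Option.map_some]
    rw [table_getD, mvcScan_eq_any, any_filter_isSome]
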